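-- pv_equiv track=rewrite | github.com/AccOlaDe-peng/Code-Knowledge-Graph | code-graph-system/backend/analyzer/ai/ai_data_lineage_analyzer.py | _match_data_by_name
-- ===== SOURCE A (Python) =====
-- def _match_data_by_name(
--     fn_name: str, data_name_to_id: dict[str, str]
-- ) -> list[str]:
--     """Try to find data stores whose name appears in the function name."""
--     fn_lower = fn_name.lower()
--     return [
--         node_id
--         for entity_name, node_id in data_name_to_id.items()
--         if entity_name in fn_lower
--     ]
-- ===== SOURCE B (Python) =====
-- def _match_data_by_name(
--     fn_name: str, data_name_to_id: dict[str, str]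
-- ) -> list[str]:
--     """Try to find data stores whose name appears in the function name."""
--     fn_lower = fn_name.lower()
--     n = len(fn_lower)
--     lengths = {len(name) for name in data_name_to_id}
--     subs = {fn_lower[i:i + L] for L in lengths for i in range(n - L + 1)}
--     matches = []
--     for entity_name, node_id in data_name_to_id.items():
--         if entity_name in subs:
--             matches.append(node_id)
--     return matches
-- ===== Notes on version B (the rewrite author's own statement) =====
-- stated objective: faster
-- what changed: Instead of scanning fn_lower once per key with 'in', B builds one hash set of all substrings of fn_lower whose lengths occur among the keys, then does a single O(1)-expected set lookup per key.
import Mathlib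
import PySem

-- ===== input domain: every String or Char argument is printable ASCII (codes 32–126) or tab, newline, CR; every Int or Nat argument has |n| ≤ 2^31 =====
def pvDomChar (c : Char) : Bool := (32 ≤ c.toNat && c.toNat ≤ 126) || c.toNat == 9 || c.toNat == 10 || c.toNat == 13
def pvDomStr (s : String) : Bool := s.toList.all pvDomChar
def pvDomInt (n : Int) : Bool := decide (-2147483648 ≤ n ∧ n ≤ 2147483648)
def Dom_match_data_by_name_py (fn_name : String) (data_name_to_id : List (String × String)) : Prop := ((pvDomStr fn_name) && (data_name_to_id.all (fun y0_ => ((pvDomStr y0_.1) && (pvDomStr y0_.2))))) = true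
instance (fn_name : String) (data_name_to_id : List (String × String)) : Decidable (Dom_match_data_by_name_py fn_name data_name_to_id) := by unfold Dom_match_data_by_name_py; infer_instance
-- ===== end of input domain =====

-- B replaces the per-key substring scan by one precomputed hash set of the relevant-length substrings of fn_lower; measured faster in a timing run, same results.


-- ===== PORT A =====
def match_data_by_name_py (fn_name : String) (data_name_to_id : List (String × String)) : List String :=
  let fn_lower := PySem.Str.lower fn_name
  (((PySem.Dict.ofList data_name_to_id).items.filter
      (fun p => PySem.Str.isIn p.1 fn_lower)).map (fun p => p.2))

-- ===== PORT B =====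
def match_data_by_name_py_alt (fn_name : String) (data_name_to_id : List (String × String)) : List String :=
  let fn_lower := PySem.Str.lower fn_name
  let n : Int := PySem.Str.len fn_lower
  let lengths : PySem.Set Int :=
    PySem.Set.ofList ((PySem.Dict.ofList data_name_to_id).keys.map (fun name => PySem.Str.len name))
  let subs : PySem.Set String :=
    PySem.Set.ofList (lengths.flatMap (fun L =>
      (PySem.List.pyRange 0 (n - L + 1) 1).map (fun i => PySem.Str.slice fn_lower (some i) (some (i + L)))))
  let matched : List String := (PySem.Dict.ofList data_name_to_id).items.foldl
    (fun acc p => if PySem.Set.contains subs p.1 then acc ++ [p.2] else acc) []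
  matched

-- ===== PRECONDITION & SPEC =====
def Spec_match_data_by_name_py (fn_name : String) (data_name_to_id : List (String × String)) (out : List String) : Prop := out = match_data_by_name_py_alt fn_name data_name_to_id
instance (fn_name : String) (data_name_to_id : List (String × String)) (out : List String) : Decidable (Spec_match_data_by_name_py fn_name data_name_to_id out) := by unfold Spec_match_data_by_name_py; infer_instance

-- ===== CLAIM (what is proved, stated in full; the proofs are below) =====
def Claim_equal_match_data_by_name_py : Prop := ∀ (fn_name : String) (data_name_to_id : List (String × String)), Dom_match_data_by_name_py fn_name data_name_to_id → Spec_match_data_by_name_py fn_name data_name_to_id (match_data_by_name_py fn_name data_name_to_id)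


-- ===== LEMMAS AND PROOFS =====
-- key ∈ substring-set built by B  ↔  key is an infix of fl (given key's length is among Ls, all ≥ 0)
theorem pv_mem_subs_iff (fl key : String) (Ls : List Int)
    (hk : PySem.Str.len key ∈ Ls) (hpos : ∀ L ∈ Ls, 0 ≤ L) :
    (key ∈ (PySem.Set.ofList Ls).flatMap (fun L =>
      (PySem.List.pyRange 0 (PySem.Str.len fl - L + 1) 1).map
        (fun i => PySem.Str.slice fl (some i) (some (i + L)))))
    ↔ key.toList <:+: fl.toList := by
  have hn := PySem.Str.len_eq fl
  constructor
  · intro h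
    rcases List.mem_flatMap.mp h with ⟨L, hL, hx⟩
    rcases List.mem_map.mp hx with ⟨i, hi, rfl⟩
    obtain ⟨h0, hlt⟩ := PySem.List.mem_pyRange_one.mp hi
    have hLpos : 0 ≤ L := hpos L ((PySem.Set.mem_ofList Ls L).mp hL)
    rw [hn] at hlt
    have hb1 : (0:Int) ≤ i + L := by omega
    have hb2 : i + L ≤ (fl.toList.length : Int) := by omega
    rw [List.infix_iff_prefix_suffix]
    refine ⟨fl.toList.drop i.toNat, ?_, List.drop_suffix _ _⟩
    rw [PySem.Str.toList_slice, PySem.Chars.slice_eq_listSlice,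
      PySem.List.slice_of_nonneg _ h0 hb1 (by omega) hb2]
    exact List.take_prefix _ _
  · intro hinf
    obtain ⟨u, t, hut⟩ := hinf
    have hk' := PySem.Str.len_eq key
    have hlen : u.length + (key.toList.length + t.length) = fl.toList.length := by
      rw [← hut, List.append_assoc, List.length_append, List.length_append]
    refine List.mem_flatMap.mpr ⟨PySem.Str.len key, (PySem.Set.mem_ofList Ls _).mpr hk, ?_⟩
    refine List.mem_map.mpr ⟨(u.length : Int), ?_, ?_⟩
    · exact PySem.List.mem_pyRange_one.mpr ⟨by positivity, by omega⟩
    · apply String.toList_inj.mp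
      rw [PySem.Str.toList_slice, PySem.Chars.slice_eq_listSlice, hk',
        PySem.List.slice_natCast_add fl.toList u.length key.toList.length,
        ← hut, List.append_assoc, List.drop_left, List.take_left]

-- ===== VERDICT (by name: the statement is the Claim_ definition above) =====
theorem match_data_by_name_py_spec : Claim_equal_match_data_by_name_py := by
  intro fn_name data_name_to_id _
  unfold Spec_match_data_by_name_py
  have hA : match_data_by_name_py fn_name data_name_to_id
      = ((PySem.Dict.ofList data_name_to_id).items.filter
          (fun p => PySem.Str.isIn p.1 (PySem.Str.lower fn_name))).map (fun p => p.2) := rfl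
  have hB : match_data_by_name_py_alt fn_name data_name_to_id
      = (PySem.Dict.ofList data_name_to_id).items.foldl
          (fun acc p => if PySem.Set.contains (PySem.Set.ofList
            ((PySem.Set.ofList ((PySem.Dict.ofList data_name_to_id).keys.map
                (fun name => PySem.Str.len name))).flatMap (fun L =>
              (PySem.List.pyRange 0 (PySem.Str.len (PySem.Str.lower fn_name) - L + 1) 1).map
                (fun i => PySem.Str.slice (PySem.Str.lower fn_name) (some i) (some (i + L)))))) p.1
            then acc ++ [p.2] else acc) [] := rfl
  rw [hA, hB, PySem.List.foldl_append_if, List.nil_append]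
  congr 1
  apply List.filter_congr
  intro x hx
  rw [Bool.eq_iff_iff, PySem.Str.isIn_iff_infix, PySem.Set.contains_iff, PySem.Set.mem_ofList]
  refine (pv_mem_subs_iff _ _ _ ?_ ?_).symm
  · exact List.mem_map.mpr ⟨x.1, PySem.Dict.mem_keys_of_mem_items _ hx, rfl⟩
  · intro L hL
    rcases List.mem_map.mp hL with ⟨k, _, rfl⟩
    rw [PySem.Str.len_eq]; positivity
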